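-- pv_equiv track=rewrite | github.com/MeGotsThis/BotGotsThis | bot/twitchmessage/_ircparams.py | parse
-- ===== SOURCE A (Python) =====
-- from typing import List, NamedTuple, Optional  # noqa: F401
--
-- class ParsedParams(NamedTuple):
--     middle: Optional[str]
--     trailing: Optional[str]
--
-- def parse(params: str) -> ParsedParams:
--     if not isinstance(params, str):
--         raise TypeError()
--
--     length: int = len(params)
--     i: int = 0
--
--     if i == length:
--         return ParsedParams(None, None)
--
--     char: str
--     middle: Optional[str]
--     trailing: Optional[str]
--     hasTrailing: bool = False
--     s: List[str] = []
--     m: List[str] = []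
--     t: List[str] = []
--     while i < length:
--         char = params[i]
--         i += 1
--
--         if char == ' ':
--             while i < length and params[i] == ' ':
--                 i += 1
--             m.extend(s)
--             m.append(' ')
--             s = []
--             continue
--         elif char == ':' and not len(s):
--             break
--         else:
--             s.append(char)
--
--     if len(s):
--         m.extend(s)
--     elif len(m):
--         del m[-1]
--
--     if char == ':':
--         hasTrailing = True
--         while i < length:
--             char = params[i]
--             i += 1
--
--             t.append(char)
--
--     if i != length:
--         raise ValueError()
--
--     middle = ''.join(m) if m else None
--     trailing = ''.join(t) if hasTrailing else None
--
--     return ParsedParams(middle, trailing)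
-- ===== SOURCE B (Python) =====
-- from typing import List, NamedTuple, Optional  # noqa: F401
--
--
-- class ParsedParams(NamedTuple):
--     middle: Optional[str]
--     trailing: Optional[str]
--
--
-- def parse(params: str) -> ParsedParams:
--     if not isinstance(params, str):
--         raise TypeError()
--     if not params:
--         return ParsedParams(None, None)
--     # locate the trailing part: everything after a leading ':' or the first ' :'
--     if params.startswith(':'):
--         middlePart: str = ''
--         trailing: Optional[str] = params[1:]
--     else:
--         idx: int = params.find(' :')
--         if idx == -1:
--             middlePart, trailing = params, None
--         else:
--             middlePart, trailing = params[:idx], params[idx + 2:]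
--     # collapse each run of spaces to a single space
--     out: List[str] = []
--     prev: str = ''
--     for ch in middlePart:
--         if ch != ' ' or prev != ' ':
--             out.append(ch)
--         prev = ch
--     # drop the separator space left at the end, if any
--     if out and out[-1] == ' ':
--         out.pop()
--     return ParsedParams(''.join(out) or None, trailing)
-- ===== Notes on version B (the rewrite author's own statement) =====
-- stated objective: idiomatic
-- what changed: A is a character-level state machine with index/pending-token/accumulator state; B first locates the trailing part with string operations (startswith(':'), find(' :'), slicing) and then normalises the middle part with a single collapse-space-runs pass plus dropping the separator space left at the end.
-- intended difference: On params that end with ':' but contain no trailing marker (do not start with ':' and contain no ' :'), A's leftover loop variable char makes it return trailing='' although no trailing part exists, while B returns trailing=None, the intended value (middle is identical); e.g. A('a:')=('a:', '') vs B('a:')=('a:', None). — e.g. on parse("a:"): A returns (some "a:", some ""), B returns (some "a:", none)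
import Mathlib
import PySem

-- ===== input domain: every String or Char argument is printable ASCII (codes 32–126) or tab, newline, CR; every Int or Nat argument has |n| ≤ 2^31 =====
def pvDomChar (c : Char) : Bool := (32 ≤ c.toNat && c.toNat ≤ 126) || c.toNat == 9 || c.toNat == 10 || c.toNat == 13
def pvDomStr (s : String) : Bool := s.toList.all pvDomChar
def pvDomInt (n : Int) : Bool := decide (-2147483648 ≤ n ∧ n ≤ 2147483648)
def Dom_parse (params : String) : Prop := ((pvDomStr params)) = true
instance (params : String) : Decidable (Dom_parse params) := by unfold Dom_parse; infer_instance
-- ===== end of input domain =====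

-- B replaces A's character-level state machine by string operations: locate the trailing part
-- (startswith ':' / find ' :' / slices), then collapse space runs in the middle part in one pass
-- (idiomatic, same cost); on params that end with ':' yet contain no trailing marker, A's leftover
-- loop variable yields trailing = '' while B returns the intended None (see D_parse).

-- ===== PORT A =====
-- inner `while i < length and params[i] == ' '` loop of A
def skipSp : List Char → List Char
  | [] => []
  | c :: r => if c = ' ' then skipSp r else c :: r

-- A's main `while i < length` loop; the Nat argument is fuel (= the number of unread characters at
-- the start; every iteration consumes at least one character, so the 0-fuel arm is never reached).
-- State: remaining input, s, m, char; returns (s, m, char, remaining input after a break).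
def loopA : Nat → List Char → List Char → List Char → Char → List Char × List Char × Char × List Char
  | _, [], s, m, ch => (s, m, ch, [])
  | 0, l, s, m, ch => (s, m, ch, l)
  | fuel + 1, c :: r, s, m, _ =>
    if c = ' ' then loopA fuel (skipSp r) [] (m ++ s ++ [' ']) c
    else if c = ':' ∧ s = [] then (s, m, c, r)
    else loopA fuel r (s ++ [c]) m c

def parse (params : String) : Option String × Option String :=
  let l := params.toList
  if l = [] then (none, none)                      -- `if i == length: return ParsedParams(None, None)`
  else
    let res := loopA l.length l [] [] ' '          -- ' ' is a dummy initial `char`; the loop runs ≥ once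
    let s := res.1
    let m := res.2.1
    let ch := res.2.2.1
    let rest := res.2.2.2
    -- `if len(s): m.extend(s)  elif len(m): del m[-1]`
    let m2 := if s ≠ [] then m ++ s else if m ≠ [] then m.dropLast else m
    -- A's trailing `while` copies every remaining character into t, so t = rest; the final
    -- `if i != length: raise ValueError()` is unreachable (each loop runs i up to length).
    ((if m2 ≠ [] then some (String.ofList m2) else none),
     (if ch = ':' then some (String.ofList rest) else none))

-- ===== PORT B =====
-- the trailing-locating phase of B: leading ':', else first ' :', else no trailing
def splitTrail2 (l : List Char) : List Char × Option (List Char) :=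
  if PySem.Chars.startswith l [':'] then ([], some (PySem.List.slice l (some 1) none))
  else
    let idx := PySem.Chars.find l [' ', ':']
    if idx = -1 then (l, none)
    else (PySem.List.slice l none (some idx), some (PySem.List.slice l (some (idx + 2)) none))

-- B's `for ch in middlePart` loop: collapse each run of spaces to a single space
def collapse1 (mp : List Char) : List Char :=
  (mp.foldl (fun (st : List Char × Option Char) ch =>
      ((if ch ≠ ' ' ∨ st.2 ≠ some ' ' then st.1 ++ [ch] else st.1), some ch)) ([], none)).1

-- B's `if out and out[-1] == ' ': out.pop()`
def strip1 (x : List Char) : List Char :=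
  if x.getLast? = some ' ' then x.dropLast else x

def parse_alt (params : String) : Option String × Option String :=
  let l := params.toList
  if l = [] then (none, none)
  else
    let mt := splitTrail2 l
    let out := strip1 (collapse1 mt.1)
    ((if out ≠ [] then some (String.ofList out) else none), mt.2.map String.ofList)

-- ===== PRECONDITION & SPEC =====
-- On params that end with ':' but contain no trailing marker (they do not start with ':' and
-- contain no ' :'), A returns trailing = '' because of the leftover loop variable `char`, while B
-- returns the intended trailing = None; the middle components agree there.
def D_parse (params : String) : Prop :=
  params.toList ≠ [] ∧
  PySem.List.pyGet? params.toList (-1) = some ':' ∧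
  params.toList.head? ≠ some ':' ∧
  PySem.Chars.isIn [' ', ':'] params.toList = false
instance (params : String) : Decidable (D_parse params) := by unfold D_parse; infer_instance

def Spec_parse (params : String) (out : Option String × Option String) : Prop :=
  ¬ D_parse params → out = parse_alt params
instance (params : String) (out : Option String × Option String) : Decidable (Spec_parse params out) := by
  unfold Spec_parse; infer_instance

def pvDiffWitness_parse : String := "a:"
def pvDiffWitnessOut_parse : (Option String × Option String) × (Option String × Option String) :=
  ((some "a:", some ""), (some "a:", none))

-- ===== CLAIM (what is proved, stated in full; the proofs are below) =====
def Claim_unchanged_parse : Prop := ∀ (params : String), Dom_parse params → Spec_parse params (parse params)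
def Claim_changed_parse : Prop :=
  Dom_parse (pvDiffWitness_parse) ∧ D_parse (pvDiffWitness_parse) ∧
  parse (pvDiffWitness_parse) = pvDiffWitnessOut_parse.1 ∧
  parse_alt (pvDiffWitness_parse) = pvDiffWitnessOut_parse.2 ∧
  pvDiffWitnessOut_parse.1 ≠ pvDiffWitnessOut_parse.2
def Claim_exact_parse : Prop := ∀ (params : String), Dom_parse params → D_parse params → parse params ≠ parse_alt params

-- ===== LEMMAS AND PROOFS =====
-- the loop with its canonical fuel, and a reference description of A's loop result by recursion
-- over the word list: (S, Δm, char, rest) = final s, what the loop appended to m, final char,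
-- remaining input after a break

def loopA' (l s m : List Char) (ch : Char) : List Char × List Char × Char × List Char :=
  loopA l.length l s m ch

def refW : List (List Char) → List Char × List Char × Char × List Char
  | [] => ([], [], ' ', [])
  | w :: ws =>
    if w.head? = some ':' then
      ([], [], ':', w.tail ++ if ws = [] then [] else ' ' :: List.intercalate [' '] ws)
    else if ws.dropWhile List.isEmpty = [] then
      (if ws = [] then (w, [], w.getLastD ' ', []) else ([], w ++ [' '], ' ', []))
    else
      let q := refW (ws.dropWhile List.isEmpty)
      (q.1, w ++ ' ' :: q.2.1, q.2.2.1, q.2.2.2)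
  termination_by ws => ws.length
  decreasing_by
    have h := List.length_dropWhile_le (List.isEmpty) ws
    simp at h ⊢; omega

def fixup (S Δ : List Char) : List Char := if S ≠ [] then Δ ++ S else Δ.dropLast

-- the words before the first ':'-headed word, and the trailing everything-after-it
def splitTrail : List (List Char) → List (List Char) × Option (List Char)
  | [] => ([], none)
  | w :: ws =>
    if PySem.Chars.startswith w [':'] then
      ([], some ((PySem.Chars.join [' '] (w :: ws)).drop 1))
    else
      let p := splitTrail ws
      (w :: p.1, p.2)

def bmid (ws : List (List Char)) : List Char :=
  let tokens := (splitTrail ws).1.filter (fun t => t ≠ [])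
  let mid := List.intercalate [' '] tokens
  if ws.head? = some [] ∧ tokens ≠ [] then ' ' :: mid else mid

-- the normalised middle of a word list: drop empty words, rejoin, keep a leading space if any
def lfmt (ws : List (List Char)) : List Char :=
  if ws.head? = some [] ∧ ws.filter (fun w => w ≠ []) ≠ [] then
    ' ' :: List.intercalate [' '] (ws.filter (fun w => w ≠ []))
  else List.intercalate [' '] (ws.filter (fun w => w ≠ []))

-- structural form of B's collapse loop (prev-is-space as a Bool)
def cRun : List Char → Bool → List Char
  | [], _ => []
  | c :: r, p =>
    if c = ' ' then (if p then cRun r true else ' ' :: cRun r true)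
    else c :: cRun r false

-- collapse of an intercalated word list when the previous character was a space
def csq : List (List Char) → List Char
  | [] => []
  | w :: rest => if w = [] then csq rest else w ++ (if rest = [] then [] else ' ' :: csq rest)

theorem skipSp_length_le (l : List Char) : (skipSp l).length ≤ l.length := by
  induction l with
  | nil => simp [skipSp]
  | cons c r ih => by_cases h : c = ' ' <;> simp [skipSp, h] <;> omega

theorem skipSp_no_space (l : List Char) (h : l.head? ≠ some ' ') : skipSp l = l := by
  cases l with
  | nil => rfl
  | cons c r => simp at h; simp [skipSp, h]

theorem loopA_fuel (fuel₁ : Nat) : ∀ (fuel₂ : Nat) (l s m : List Char) (ch : Char),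
    l.length ≤ fuel₁ → l.length ≤ fuel₂ →
    loopA fuel₁ l s m ch = loopA fuel₂ l s m ch := by
  induction fuel₁ with
  | zero =>
    intro fuel₂ l s m ch h₁ h₂
    have : l = [] := by cases l <;> simp_all
    subst this; cases fuel₂ <;> rfl
  | succ f ih =>
    intro fuel₂ l s m ch h₁ h₂
    cases l with
    | nil => cases fuel₂ <;> rfl
    | cons c r =>
      cases fuel₂ with
      | zero => simp at h₂
      | succ f₂ =>
        simp only [loopA]
        simp only [List.length_cons] at h₁ h₂
        by_cases hsp : c = ' '
        · simp only [hsp, if_pos rfl]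
          exact ih f₂ _ _ _ _ (le_trans (skipSp_length_le r) (by omega)) (le_trans (skipSp_length_le r) (by omega))
        · simp only [if_neg hsp]
          by_cases hb : c = ':' ∧ s = []
          · simp [hb]
          · simp only [if_neg hb]
            exact ih f₂ _ _ _ _ (by omega) (by omega)

theorem loopA'_eq (fuel : Nat) (l s m : List Char) (ch : Char) (h : l.length ≤ fuel) :
    loopA fuel l s m ch = loopA' l s m ch :=
  loopA_fuel fuel l.length l s m ch h le_rfl

theorem loopA'_nil (s m : List Char) (ch : Char) : loopA' [] s m ch = (s, m, ch, []) := rfl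

theorem loopA'_colon (v s m : List Char) (ch : Char) (hs : s = []) :
    loopA' (':' :: v) s m ch = ([], m, ':', v) := by
  subst hs; simp [loopA', loopA]

theorem loopA'_space (r s m : List Char) (ch : Char) :
    loopA' (' ' :: r) s m ch = loopA' (skipSp r) [] (m ++ s ++ [' ']) ' ' := by
  simp only [loopA', List.length_cons, loopA, if_pos rfl]
  exact loopA'_eq r.length (skipSp r) [] (m ++ s ++ [' ']) ' ' (skipSp_length_le r)

theorem loopA'_token (tok : List Char) : ∀ (rest s m : List Char) (ch : Char),
    (∀ c ∈ tok, c ≠ ' ') → (s = [] → tok.head? ≠ some ':') →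
    loopA' (tok ++ rest) s m ch = loopA' rest (s ++ tok) m (tok.getLastD ch) := by
  induction tok with
  | nil => intro rest s m ch _ _; simp [List.getLastD]
  | cons c tok ih =>
    intro rest s m ch hsp hcol
    have hc : c ≠ ' ' := hsp c (by simp)
    have hnb : ¬ (c = ':' ∧ s = []) := by
      rintro ⟨rfl, rfl⟩; exact (hcol rfl) (by simp)
    simp only [List.cons_append, loopA', List.length_cons, loopA, if_neg hc, if_neg hnb]
    rw [loopA'_eq _ _ _ _ _ (by simp)]
    rw [ih rest (s ++ [c]) m c (fun x hx => hsp x (by simp [hx])) (by simp)]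
    have h1 : (s ++ [c]) ++ tok = s ++ (c :: tok) := by simp
    have h2 : tok.getLastD c = (c :: tok).getLastD ch := by cases tok <;> simp [List.getLastD]
    rw [h1, h2]; rfl

theorem inter_cons (w : List Char) (ws : List (List Char)) :
    List.intercalate [' '] (w :: ws) = if ws = [] then w else w ++ ' ' :: List.intercalate [' '] ws := by
  cases ws with
  | nil => simp [List.intercalate]
  | cons b bs => simp [List.intercalate, List.intersperse]

theorem skipSp_all_empty (ws : List (List Char)) (h : ∀ w ∈ ws, w = []) :
    skipSp (List.intercalate [' '] ws) = [] := by
  induction ws with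
  | nil => simp [List.intercalate, skipSp]
  | cons w ws ih =>
    have hw : w = [] := h w (by simp)
    rw [inter_cons]
    by_cases hws : ws = []
    · simp [hws, hw, skipSp]
    · simp only [if_neg hws, hw, List.nil_append, skipSp, if_pos rfl]
      exact ih (fun x hx => h x (by simp [hx]))

theorem skipSp_drop (ws : List (List Char)) : ∀ (w' : List Char) (ws' : List (List Char)),
    (∀ w ∈ ws, ' ' ∉ w) → ws.dropWhile List.isEmpty = w' :: ws' →
    skipSp (List.intercalate [' '] ws) = List.intercalate [' '] (w' :: ws') := by
  induction ws with
  | nil => intro w' ws' _ h; simp at h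
  | cons w₀ rest ih =>
    intro w' ws' hsp hd
    by_cases h0 : w₀ = []
    · subst h0
      simp only [List.dropWhile_cons, List.isEmpty_nil, if_pos rfl] at hd
      have hrest : rest ≠ [] := by rintro rfl; simp at hd
      rw [inter_cons, if_neg hrest]
      simp only [List.nil_append, skipSp, if_pos rfl]
      exact ih w' ws' (fun x hx => hsp x (by simp [hx])) hd
    · rw [List.dropWhile_cons] at hd
      simp only [List.isEmpty_iff, if_neg h0] at hd
      rw [← hd]
      apply skipSp_no_space
      rw [inter_cons]
      obtain ⟨c, w₀, rfl⟩ : ∃ c t, w₀ = c :: t := by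
        cases w₀ with
        | nil => exact absurd rfl h0
        | cons c t => exact ⟨c, t, rfl⟩
      have hc : c ≠ ' ' := fun h => (hsp (c :: w₀) (by simp)) (by simp [h])
      by_cases hrest : rest = [] <;> simp [hrest, hc]

theorem loopA'_refW : ∀ (n : Nat) (ws : List (List Char)) (m : List Char),
    ws.length ≤ n → (∀ w ∈ ws, ' ' ∉ w) → ws ≠ [] → ws ≠ [[]] →
    loopA' (List.intercalate [' '] ws) [] m ' ' =
      ((refW ws).1, m ++ (refW ws).2.1, (refW ws).2.2.1, (refW ws).2.2.2) := by
  intro n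
  induction n with
  | zero => intro ws m hlen _ hne _; cases ws <;> simp_all
  | succ n ih =>
    intro ws m hlen hsp hne hne1
    cases ws with
    | nil => exact absurd rfl hne
    | cons w ws =>
      by_cases hcol : w.head? = some ':'
      · obtain ⟨v, rfl⟩ : ∃ v, w = ':' :: v := by
          cases w with
          | nil => simp at hcol
          | cons c t => simp at hcol; exact ⟨t, by rw [hcol]⟩
        rw [inter_cons]
        by_cases hws : ws = []
        · rw [if_pos hws, loopA'_colon v [] m ' ' rfl]
          simp [refW, hws]
        · rw [if_neg hws]
          have : (':' :: v) ++ ' ' :: List.intercalate [' '] ws = ':' :: (v ++ ' ' :: List.intercalate [' '] ws) := by simp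
          rw [this, loopA'_colon _ [] m ' ' rfl]
          rw [refW.eq_2]
          simp [hws]
      · have hspw : ∀ c ∈ w, c ≠ ' ' := fun c hc h => (hsp w (by simp)) (h ▸ hc)
        rw [inter_cons]
        by_cases hws : ws = []
        · subst hws
          have hwne : w ≠ [] := by rintro rfl; exact hne1 rfl
          rw [if_pos rfl]
          have := loopA'_token w [] [] m ' ' hspw (fun _ => hcol)
          simp only [List.append_nil] at this
          rw [this, loopA'_nil]
          rw [refW.eq_2]
          simp [hcol]
        · rw [if_neg hws]
          rw [loopA'_token w (' ' :: List.intercalate [' '] ws) [] m ' ' hspw (fun _ => hcol)]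
          simp only [List.nil_append]
          rw [loopA'_space]
          cases hd : ws.dropWhile List.isEmpty with
          | nil =>
            have hall : ∀ x ∈ ws, x = [] := by
              rw [List.dropWhile_eq_nil_iff] at hd
              intro x hx; simpa using hd x hx
            rw [skipSp_all_empty ws hall, loopA'_nil]
            conv_rhs => rw [refW.eq_2]
            rw [if_neg hcol, hd]
            simp [hws]
          | cons w' ws' =>
            rw [skipSp_drop ws w' ws' (fun x hx => hsp x (by simp [hx])) hd]
            have hw'ne : w' ≠ [] := by
              have := List.head?_dropWhile_not List.isEmpty ws
              rw [hd] at this; simpa using this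
            have hlen' : (w' :: ws').length ≤ n := by
              have h1 := List.length_dropWhile_le (List.isEmpty) ws
              rw [hd] at h1; simp at h1 hlen ⊢; omega
            have hsp' : ∀ x ∈ w' :: ws', ' ' ∉ x := by
              intro x hx
              exact hsp x (by
                have := (List.dropWhile_sublist (l := ws) (List.isEmpty))
                rw [hd] at this
                exact List.mem_cons_of_mem _ (this.mem hx))
            rw [ih (w' :: ws') (m ++ w ++ [' ']) hlen' hsp' (by simp) (by simp [hw'ne])]
            conv_rhs => rw [refW.eq_2]
            rw [if_neg hcol, hd]
            simp

theorem sw_colon (w : List Char) : (PySem.Chars.startswith w [':'] = true) ↔ w.head? = some ':' := by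
  cases w with
  | nil => simp [PySem.Chars.startswith, List.isPrefixOf]
  | cons c t =>
    simp [PySem.Chars.startswith, List.isPrefixOf, beq_iff_eq]
    exact eq_comm

theorem gld_append (a b : List Char) (d : Char) (h : b ≠ []) : (a ++ b).getLastD d = b.getLastD d := by
  cases b with
  | nil => simp at h
  | cons x xs =>
    simp only [List.getLastD_eq_getLast?]
    rw [List.getLast?_append_of_ne_nil _ (by simp)]

theorem gld_mem (l : List Char) (d : Char) (h : l ≠ []) : l.getLastD d ∈ l := by
  cases l with
  | nil => simp at h
  | cons x xs =>
    rw [List.getLastD_eq_getLast?, List.getLast?_eq_some_getLast (l := x :: xs) (by simp)]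
    simp [List.getLast_mem]

theorem splitTrail_cons_colon (w : List Char) (ws : List (List Char)) (h : w.head? = some ':') :
    splitTrail (w :: ws) = ([], some ((PySem.Chars.join [' '] (w :: ws)).drop 1)) := by
  simp [splitTrail, (sw_colon w).2 h]

theorem splitTrail_cons_not (w : List Char) (ws : List (List Char)) (h : w.head? ≠ some ':') :
    splitTrail (w :: ws) = (w :: (splitTrail ws).1, (splitTrail ws).2) := by
  have : PySem.Chars.startswith w [':'] = false := by
    rcases Bool.eq_false_or_eq_true (PySem.Chars.startswith w [':']) with hb | hb
    · exact absurd ((sw_colon w).1 hb) h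
    · exact hb
  simp [splitTrail, this]

theorem splitTrail_none_iff' (ws : List (List Char)) :
    (splitTrail ws).2 = none ↔ ∀ w ∈ ws, w.head? ≠ some ':' := by
  induction ws with
  | nil => simp [splitTrail]
  | cons w ws ih =>
    by_cases h : w.head? = some ':'
    · rw [splitTrail_cons_colon w ws h]; simp [h]
    · rw [splitTrail_cons_not w ws h]; simp [h, ih]

theorem splitTrail_all_not (ws : List (List Char)) (h : ∀ w ∈ ws, w.head? ≠ some ':') :
    splitTrail ws = (ws, none) := by
  induction ws with
  | nil => rfl
  | cons w ws ih =>
    rw [splitTrail_cons_not w ws (h w (by simp)), ih (fun x hx => h x (by simp [hx]))]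

theorem splitTrail_drop (ws : List (List Char)) :
    (splitTrail (ws.dropWhile List.isEmpty)).2 = (splitTrail ws).2 ∧
    (splitTrail (ws.dropWhile List.isEmpty)).1.filter (fun t => t ≠ []) =
      (splitTrail ws).1.filter (fun t => t ≠ []) := by
  induction ws with
  | nil => simp
  | cons w ws ih =>
    by_cases h : w = []
    · subst h
      rw [List.dropWhile_cons]
      simp only [List.isEmpty_nil, if_pos rfl]
      rw [splitTrail_cons_not [] ws (by simp)]
      simpa using ih
    · rw [List.dropWhile_cons, if_neg (by simpa [List.isEmpty_iff] using h)]
      exact ⟨rfl, rfl⟩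

theorem interNE (ws : List (List Char)) (w : List Char) (hw : w ∈ ws) (hne : w ≠ []) :
    List.intercalate [' '] ws ≠ [] := by
  induction ws with
  | nil => simp at hw
  | cons x ws ih =>
    rw [inter_cons]
    by_cases hws : ws = []
    · subst hws; simp at hw; subst hw; simpa using hne
    · simp only [if_neg hws]
      rcases List.mem_cons.1 hw with rfl | hw2 <;> simp

theorem lift_getLastD (ws : List (List Char)) : ∀ (w' : List Char) (ws' : List (List Char)) (d : Char),
    ws.dropWhile List.isEmpty = w' :: ws' →
    (List.intercalate [' '] ws).getLastD d = (List.intercalate [' '] (w' :: ws')).getLastD d := by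
  induction ws with
  | nil => intro w' ws' d h; simp at h
  | cons w₀ rest ih =>
    intro w' ws' d hd
    by_cases h0 : w₀ = []
    · subst h0
      have hd' : List.dropWhile List.isEmpty rest = w' :: ws' := hd
      have hrest : rest ≠ [] := by rintro rfl; simp at hd'
      have hw'ne : w' ≠ [] := by
        have := List.head?_dropWhile_not List.isEmpty rest
        rw [hd'] at this; simpa using this
      have hw'mem : w' ∈ rest := by
        have hsub := List.dropWhile_sublist (l := rest) List.isEmpty
        rw [hd'] at hsub
        exact hsub.mem (by simp)
      rw [inter_cons, if_neg hrest]
      rw [List.nil_append]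
      have hne : List.intercalate [' '] rest ≠ [] := interNE rest w' hw'mem hw'ne
      rw [show (' ' :: List.intercalate [' '] rest).getLastD d
            = (List.intercalate [' '] rest).getLastD d from by
        cases h : List.intercalate [' '] rest with
        | nil => exact absurd h hne
        | cons a b => simp [List.getLastD_eq_getLast?, List.getLast?_cons_cons]]
      exact ih w' ws' d hd'
    · rw [List.dropWhile_cons, if_neg (by simpa [List.isEmpty_iff] using h0)] at hd
      rw [hd]

theorem inter_all_empty_mem (ws : List (List Char)) (h : ∀ w ∈ ws, w = []) :
    ∀ c ∈ List.intercalate [' '] ws, c = ' ' := by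
  induction ws with
  | nil => simp [List.intercalate]
  | cons w ws ih =>
    rw [inter_cons]
    by_cases hws : ws = []
    · simp [hws, h w (by simp)]
    · rw [if_neg hws, h w (by simp)]
      intro c hc
      simp at hc
      rcases hc with rfl | hc
      · rfl
      · exact ih (fun x hx => h x (by simp [hx])) c hc

theorem tokens_ne_inter_ne (ts : List (List Char)) (src : List (List Char))
    (h : ts = src.filter (fun t => t ≠ [])) (hne : ts ≠ []) : List.intercalate [' '] ts ≠ [] := by
  cases hts : ts with
  | nil => exact absurd hts hne
  | cons a b =>
    have ha : a ≠ [] := by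
      have : a ∈ src.filter (fun t => t ≠ []) := by rw [← h, hts]; simp
      simpa using (List.mem_filter.1 this).2
    exact interNE (a :: b) a (by simp) ha

theorem refW_splitTrail : ∀ (n : Nat) (ws : List (List Char)),
    ws.length ≤ n → (∀ w ∈ ws, ' ' ∉ w) → ws ≠ [] → ws ≠ [[]] →
    fixup (refW ws).1 (refW ws).2.1 = bmid ws ∧
    (∀ x, (splitTrail ws).2 = some x → (refW ws).2.2.1 = ':' ∧ (refW ws).2.2.2 = x) ∧
    ((splitTrail ws).2 = none → (refW ws).2.2.2 = [] ∧
        (refW ws).2.2.1 = (List.intercalate [' '] ws).getLastD ' ') ∧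
    (ws.headD [] ≠ [] → (refW ws).1 = [] → (refW ws).2.1 ≠ [] →
        (splitTrail ws).1.filter (fun t => t ≠ []) ≠ []) := by
  intro n
  induction n with
  | zero => intro ws hlen _ hne _; cases ws <;> simp_all
  | succ n ih =>
    intro ws hlen hsp hne hne1
    cases ws with
    | nil => exact absurd rfl hne
    | cons w ws =>
      by_cases hcol : w.head? = some ':'
      · obtain ⟨v, rfl⟩ : ∃ v, w = ':' :: v := by
          cases w with
          | nil => simp at hcol
          | cons c t => simp at hcol; exact ⟨t, by rw [hcol]⟩
        have hrw : refW ((':' :: v) :: ws) =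
            ([], [], ':', v ++ if ws = [] then [] else ' ' :: List.intercalate [' '] ws) := by
          rw [refW.eq_2, if_pos (by simp)]
          rfl
        rw [hrw, splitTrail_cons_colon _ ws (by simp)]
        refine ⟨?_, ?_, ?_, ?_⟩
        · show fixup [] [] = bmid ((':' :: v) :: ws)
          rw [bmid, splitTrail_cons_colon _ ws (by simp)]
          simp [fixup, List.intercalate]
        · intro x hx
          simp only [Option.some.injEq] at hx
          subst hx
          refine ⟨rfl, ?_⟩
          show v ++ _ = _
          have hj : PySem.Chars.join [' '] ((':' :: v) :: ws) =
              (':' :: v) ++ if ws = [] then [] else ' ' :: List.intercalate [' '] ws := by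
            show List.intercalate [' '] ((':' :: v) :: ws) = _
            rw [inter_cons]
            by_cases hws : ws = [] <;> simp [hws]
          rw [hj]
          simp
        · intro hx; simp at hx
        · intro _ _ hΔ; exact absurd rfl hΔ
      · have hwsp : ' ' ∉ w := hsp w (by simp)
        rw [splitTrail_cons_not w ws hcol]
        cases hd : ws.dropWhile List.isEmpty with
        | nil =>
          have hall : ∀ x ∈ ws, x = [] := by
            rw [List.dropWhile_eq_nil_iff] at hd
            intro x hx; simpa using hd x hx
          have hstws : splitTrail ws = (ws, none) :=
            splitTrail_all_not ws (fun x hx => by rw [hall x hx]; simp)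
          have hfilter : ws.filter (fun t => t ≠ []) = [] := by
            rw [List.filter_eq_nil_iff]; intro a ha; simpa using hall a ha
          by_cases hws : ws = []
          · subst hws
            have hwne : w ≠ [] := by rintro rfl; exact hne1 rfl
            have hrw : refW [w] = (w, [], w.getLastD ' ', []) := by
              rw [refW.eq_2, if_neg hcol]; simp
            rw [hrw]
            refine ⟨?_, ?_, ?_, ?_⟩
            · show fixup w [] = bmid [w]
              rw [fixup, if_pos (by simpa using hwne), bmid, splitTrail_cons_not w [] hcol]
              simp [splitTrail, hwne, inter_cons]
            · intro x hx; simp [splitTrail] at hx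
            · intro _
              refine ⟨rfl, ?_⟩
              rw [inter_cons, if_pos rfl]
            · intro _ hS _
              exact absurd hS hwne
          · have hrw : refW (w :: ws) = ([], w ++ [' '], ' ', []) := by
              rw [refW.eq_2, if_neg hcol, hd]; simp [hws]
            rw [hrw, hstws]
            refine ⟨?_, ?_, ?_, ?_⟩
            · show fixup [] (w ++ [' ']) = _
              rw [fixup, if_neg (by simp), List.dropLast_concat]
              rw [bmid]
              rw [splitTrail_cons_not w ws hcol, hstws]
              simp only [List.filter_cons, hfilter]
              by_cases hwne : w = []
              · subst hwne; simp [List.intercalate]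
              · simp only [List.head?_cons]
                rw [if_neg (by simp [hwne])]
                simp [hwne, inter_cons]
            · intro x hx; simp at hx
            · intro _
              refine ⟨rfl, ?_⟩
              rw [inter_cons, if_neg hws]
              rw [gld_append _ _ _ (by simp)]
              have hmem := gld_mem (' ' :: List.intercalate [' '] ws) ' ' (by simp)
              rcases List.mem_cons.1 hmem with h | h
              · exact h.symm
              · exact (inter_all_empty_mem ws hall _ h).symm
            · intro hh _ _
              have hwne : w ≠ [] := by simpa using hh
              simp [List.filter_cons, hwne]
        | cons w' ws' =>
          have hw'ne : w' ≠ [] := by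
            have := List.head?_dropWhile_not List.isEmpty ws
            rw [hd] at this; simpa using this
          have hw'mem : w' ∈ ws := by
            have hsub := List.dropWhile_sublist (l := ws) List.isEmpty
            rw [hd] at hsub
            exact hsub.mem (by simp)
          have hws : ws ≠ [] := by rintro rfl; simp at hd
          have hlen' : (w' :: ws').length ≤ n := by
            have h1 := List.length_dropWhile_le (List.isEmpty) ws
            rw [hd] at h1; simp at h1 hlen ⊢; omega
          have hsp' : ∀ x ∈ w' :: ws', ' ' ∉ x := by
            intro x hx
            refine hsp x (List.mem_cons_of_mem _ ?_)
            have hsub := List.dropWhile_sublist (l := ws) List.isEmpty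
            rw [hd] at hsub
            exact hsub.mem hx
          obtain ⟨iha, ihb, ihc, ihd⟩ := ih (w' :: ws') hlen' hsp' (by simp) (by simp [hw'ne])
          have hSTd := splitTrail_drop ws
          rw [hd] at hSTd
          have hrw : refW (w :: ws) = ((refW (w' :: ws')).1, w ++ ' ' :: (refW (w' :: ws')).2.1,
              (refW (w' :: ws')).2.2.1, (refW (w' :: ws')).2.2.2) := by
            rw [refW.eq_2, if_neg hcol, hd]
            simp
          rw [hrw]
          have hbmid' : bmid (w' :: ws') =
              List.intercalate [' '] ((splitTrail (w' :: ws')).1.filter (fun t => t ≠ [])) := by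
            rw [bmid]
            simp only [List.head?_cons]
            rw [if_neg (by simp [hw'ne])]
          rw [hbmid'] at iha
          set q := refW (w' :: ws') with hq
          set tks := (splitTrail (w' :: ws')).1.filter (fun t => t ≠ []) with htks
          refine ⟨?_, ?_, ?_, ?_⟩
          · show fixup q.1 (w ++ ' ' :: q.2.1) = bmid (w :: ws)
            have hbm : bmid (w :: ws) =
                (if (w :: ws).head? = some [] ∧
                    ((if w = [] then [] else [w]) ++ tks) ≠ [] then
                  ' ' :: List.intercalate [' '] ((if w = [] then [] else [w]) ++ tks)
                 else List.intercalate [' '] ((if w = [] then [] else [w]) ++ tks)) := by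
              rw [bmid]
              rw [splitTrail_cons_not w ws hcol]
              simp only [List.filter_cons]
              rw [← hSTd.2]
              by_cases hwne : w = [] <;> simp [hwne]
            rw [hbm]
            by_cases hq1 : q.1 = []
            · rw [fixup, if_neg (by simpa using hq1)] at iha
              by_cases hq21 : q.2.1 = []
              · have htksnil : tks = [] := by
                  by_contra hts
                  exact (tokens_ne_inter_ne tks (splitTrail (w' :: ws')).1 htks hts)
                    (by rw [← iha, hq21]; simp)
                rw [fixup, if_neg (by simpa using hq1), hq21]
                rw [htksnil]
                by_cases hwne : w = []
                · subst hwne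
                  simp [List.intercalate]
                · simp [hwne, List.dropLast_concat, inter_cons]
              · have htksne : tks ≠ [] := ihd (by simpa using hw'ne) hq1 hq21
                rw [fixup, if_neg (by simpa using hq1)]
                rw [show w ++ ' ' :: q.2.1 = w ++ (' ' :: q.2.1) from rfl]
                rw [List.dropLast_append_of_ne_nil (by simp)]
                rw [List.dropLast_cons_of_ne_nil hq21]
                rw [iha]
                by_cases hwne : w = []
                · subst hwne; simp [htksne]
                · rw [if_neg (by simp [hwne])]
                  rw [if_neg hwne]
                  rw [show ([w] ++ tks : List (List Char)) = w :: tks from rfl]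
                  rw [inter_cons, if_neg htksne]
            · rw [fixup, if_pos (by simpa using hq1)] at iha
              have htksne : tks ≠ [] := by
                by_contra hts
                rw [hts] at iha
                simp [List.intercalate] at iha
                exact hq1 iha.2
              rw [fixup, if_pos (by simpa using hq1)]
              rw [show (w ++ ' ' :: q.2.1) ++ q.1 = w ++ ' ' :: (q.2.1 ++ q.1) from by simp]
              rw [iha]
              by_cases hwne : w = []
              · subst hwne; simp [htksne]
              · rw [if_neg (by simp [hwne])]
                rw [if_neg hwne]
                rw [show ([w] ++ tks : List (List Char)) = w :: tks from rfl]
                rw [inter_cons, if_neg htksne]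
          · intro x hx
            show q.2.2.1 = ':' ∧ q.2.2.2 = x
            exact ihb x (by rw [hSTd.1]; exact hx)
          · intro hx
            have hcc := ihc (by rw [hSTd.1]; exact hx)
            refine ⟨hcc.1, ?_⟩
            show q.2.2.1 = _
            rw [hcc.2]
            have hinterne : List.intercalate [' '] ws ≠ [] := interNE ws w' hw'mem hw'ne
            rw [inter_cons w ws, if_neg hws]
            rw [gld_append _ _ _ (by simp)]
            rw [show (' ' :: List.intercalate [' '] ws).getLastD ' ' =
                  (List.intercalate [' '] ws).getLastD ' ' from by
              cases h : List.intercalate [' '] ws with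
              | nil => exact absurd h hinterne
              | cons a b => simp [List.getLastD_eq_getLast?, List.getLast?_cons_cons]]
            rw [lift_getLastD ws w' ws' ' ' hd]
          · intro hh hS hΔ
            have hwne : w ≠ [] := by simpa using hh
            simp [List.filter_cons, hwne]

theorem splitOn_cons (c a : Char) (xs : List Char) :
    List.splitOn c (a :: xs) =
      if a = c then [] :: List.splitOn c xs else (List.splitOn c xs).modifyHead (a :: ·) := by
  simp [List.splitOn, List.splitOnP_cons]

theorem splitOn_no_space (l : List Char) : ∀ w ∈ List.splitOn ' ' l, ' ' ∉ w := by
  induction l with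
  | nil => intro w hw; simp [List.splitOn] at hw; simp [hw]
  | cons a xs ih =>
    intro w hw
    rw [splitOn_cons] at hw
    by_cases hac : a = ' '
    · rw [if_pos hac] at hw
      rcases List.mem_cons.1 hw with rfl | hw2
      · simp
      · exact ih w hw2
    · rw [if_neg hac] at hw
      cases hs : List.splitOn ' ' xs with
      | nil => exact absurd hs (List.splitOnP_ne_nil _ xs)
      | cons b t =>
        rw [hs] at hw
        simp only [List.modifyHead] at hw
        rcases List.mem_cons.1 hw with rfl | hw2
        · intro hmem
          rcases List.mem_cons.1 hmem with rfl | hmem2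
          · exact hac rfl
          · exact ih b (by rw [hs]; simp) hmem2
        · exact ih w (by rw [hs]; simp [hw2])

theorem splitOn_ne_nil (l : List Char) : List.splitOn ' ' l ≠ [] := List.splitOnP_ne_nil _ l

theorem splitOn_eq_nil_nil (l : List Char) (h : List.splitOn ' ' l = [[]]) : l = [] := by
  have := List.intercalate_splitOn l ' '
  rw [h] at this
  simpa [List.intercalate] using this.symm

theorem infix_word_append (w L' : List Char) (hsp : ' ' ∉ w) :
    ([' ', ':'] <:+: w ++ ' ' :: L') ↔ (L'.head? = some ':' ∨ [' ', ':'] <:+: L') := by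
  induction w with
  | nil =>
    simp only [List.nil_append]
    rw [List.infix_cons_iff]
    constructor
    · rintro (hp | hi)
      · left
        obtain ⟨t, ht⟩ := hp
        simp at ht
        cases L' with
        | nil => simp at ht
        | cons x y => simp at ht ⊢; exact ht.1.symm
      · right; exact hi
    · rintro (hh | hi)
      · left
        cases L' with
        | nil => simp at hh
        | cons x y => simp at hh; subst hh; exact ⟨y, by simp⟩
      · right; exact hi
  | cons a w ih =>
    have ha : a ≠ ' ' := fun h => hsp (by simp [h])
    rw [List.cons_append, List.infix_cons_iff]
    constructor
    · rintro (hp | hi)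
      · obtain ⟨t, ht⟩ := hp
        simp at ht
        exact absurd ht.1.symm ha
      · exact (ih (fun h => hsp (by simp [h]))).1 hi
    · intro h
      right
      exact (ih (fun h => hsp (by simp [h]))).2 h

theorem tic_iff (ws : List (List Char)) (hsp : ∀ w ∈ ws, ' ' ∉ w) :
    (∃ w ∈ ws, w.head? = some ':') ↔
      ((List.intercalate [' '] ws).head? = some ':' ∨ [' ', ':'] <:+: List.intercalate [' '] ws) := by
  induction ws with
  | nil =>
    simp [List.intercalate]
  | cons w ws ih =>
    rw [inter_cons]
    by_cases hcol : w.head? = some ':'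
    · obtain ⟨v, rfl⟩ : ∃ v, w = ':' :: v := by
        cases w with
        | nil => simp at hcol
        | cons c t => simp at hcol; exact ⟨t, by rw [hcol]⟩
      by_cases hws : ws = [] <;> simp [hws]
    · constructor
      · rintro ⟨x, hx, hxc⟩
        rcases List.mem_cons.1 hx with rfl | hx2
        · exact absurd hxc hcol
        · have hws : ws ≠ [] := by rintro rfl; simp at hx2
          rw [if_neg hws]
          right
          rw [infix_word_append w _ (hsp w (by simp))]
          have := (ih (fun x hx => hsp x (by simp [hx]))).1 ⟨x, hx2, hxc⟩
          rcases this with hh | hi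
          · left
            cases hil : List.intercalate [' '] ws with
            | nil => rw [hil] at hh; simp at hh
            | cons a b => rw [hil] at hh; simpa [hil] using hh
          · right; exact hi
      · intro h
        by_cases hws : ws = []
        · subst hws
          rw [if_pos rfl] at h
          rcases h with hh | hi
          · exact absurd hh hcol
          · exact absurd (hi.subset (show ' ' ∈ [' ', ':'] by simp)) (hsp w (by simp))
        · rw [if_neg hws] at h
          rcases h with hh | hi
          · exfalso
            cases w with
            | nil => simp at hh
            | cons a t =>
              simp at hh
              exact hcol (by simp [hh])
          · rw [infix_word_append w _ (hsp w (by simp))] at hi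
            have : ∃ x ∈ ws, x.head? = some ':' := by
              apply (ih (fun x hx => hsp x (by simp [hx]))).2
              rcases hi with hh | hi2
              · left; exact hh
              · right; exact hi2
            obtain ⟨x, hx, hxc⟩ := this
            exact ⟨x, by simp [hx], hxc⟩

theorem gl2 (l : List Char) (d x : Char) (hne : l ≠ []) (h : l.getLastD d = x) :
    l.getLast? = some x := by
  cases hl : l.getLast? with
  | none => rw [List.getLast?_eq_none_iff] at hl; exact absurd hl hne
  | some y =>
    rw [List.getLastD_eq_getLast?, hl] at h
    simp at h; rw [h]

theorem m2_eq_fixup (S Δ : List Char) :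
    (if S ≠ [] then Δ ++ S else if Δ ≠ [] then Δ.dropLast else Δ) = fixup S Δ := by
  rw [fixup]
  by_cases hS : S = [] <;> by_cases hΔ : Δ = [] <;> simp [hS, hΔ]

-- ===== A's side assembled =====

theorem parse_eq (params : String) (hl : params.toList ≠ []) :
    parse params =
      ((if fixup (refW (List.splitOn ' ' params.toList)).1
            (refW (List.splitOn ' ' params.toList)).2.1 ≠ [] then
          some (String.ofList (fixup (refW (List.splitOn ' ' params.toList)).1
            (refW (List.splitOn ' ' params.toList)).2.1)) else none),
       (if (refW (List.splitOn ' ' params.toList)).2.2.1 = ':' then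
          some (String.ofList (refW (List.splitOn ' ' params.toList)).2.2.2) else none)) := by
  set l := params.toList with hldef
  set ws := List.splitOn ' ' l with hwsdef
  have hsp : ∀ w ∈ ws, ' ' ∉ w := splitOn_no_space l
  have hne : ws ≠ [] := splitOn_ne_nil l
  have hne1 : ws ≠ [[]] := fun h => hl (splitOn_eq_nil_nil l h)
  have hj : List.intercalate [' '] ws = l := List.intercalate_splitOn l ' '
  have hloop := loopA'_refW ws.length ws [] le_rfl hsp hne hne1
  rw [hj] at hloop
  rw [parse]
  rw [if_neg hl]
  show ((if (if (loopA l.length l [] [] ' ').1 ≠ [] then _ else _) ≠ [] then _ else _), _) = _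
  rw [show loopA l.length l [] [] ' ' = loopA' l [] [] ' ' from rfl]
  rw [hloop]
  simp only [List.nil_append]
  rw [m2_eq_fixup]

-- ===== B's side: collapse loop characterised =====

theorem foldl_cRun (l : List Char) : ∀ (out : List Char) (p : Option Char),
    (l.foldl (fun (st : List Char × Option Char) ch =>
        ((if ch ≠ ' ' ∨ st.2 ≠ some ' ' then st.1 ++ [ch] else st.1), some ch)) (out, p)).1
      = out ++ cRun l (p == some ' ') := by
  induction l with
  | nil => intro out p; simp [cRun]
  | cons c r ih =>
    intro out p
    rw [List.foldl_cons, ih]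
    by_cases hc : c = ' '
    · subst hc
      by_cases hp : p = some ' '
      · subst hp
        simp [cRun]
      · have : (p == some ' ') = false := by
          cases p with
          | none => rfl
          | some a => simp [beq_iff_eq]; intro h; exact hp (by rw [h])
        simp [cRun, this, hp]
    · have hcb : (c == ' ') = false := by simp [hc]
      simp [cRun, hc, hcb]

theorem collapse1_eq (mp : List Char) : collapse1 mp = cRun mp false := by
  rw [collapse1, foldl_cRun mp [] none]
  rfl

theorem cRun_append (w : List Char) (hsp : ' ' ∉ w) (hne : w ≠ []) :
    ∀ (r : List Char) (p : Bool), cRun (w ++ r) p = w ++ cRun r false := by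
  induction w with
  | nil => exact absurd rfl hne
  | cons c w ih =>
    intro r p
    have hc : c ≠ ' ' := fun h => hsp (by simp [h])
    rw [List.cons_append]
    rw [show cRun (c :: (w ++ r)) p = c :: cRun (w ++ r) false from by simp [cRun, hc]]
    by_cases hw : w = []
    · subst hw; simp
    · rw [ih (fun h => hsp (by simp [h])) hw r false]
      simp

theorem glast_cons_of_ne (c : Char) (A : List Char) (h : A ≠ []) :
    (c :: A).getLast? = A.getLast? := by
  cases A with
  | nil => exact absurd rfl h
  | cons a b => exact List.getLast?_cons_cons

theorem getLast?_all_nonempty (ws : List (List Char)) (hne : ws ≠ [])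
    (h : ∀ w ∈ ws, w = []) : ws.getLast? = some [] := by
  cases hl : ws.getLast? with
  | none => rw [List.getLast?_eq_none_iff] at hl; exact absurd hl hne
  | some w =>
    have : w ∈ ws := List.mem_of_getLast? hl
    rw [h w this]

theorem csq_spec : ∀ (ws : List (List Char)), (∀ w ∈ ws, ' ' ∉ w) →
    csq ws = List.intercalate [' '] (ws.filter (fun w => w ≠ [])) ++
      (if ws.filter (fun w => w ≠ []) ≠ [] ∧ ws.getLast? = some [] then [' '] else []) := by
  intro ws
  induction ws with
  | nil => intro _; simp [csq, List.intercalate]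
  | cons w rest ih =>
    intro hsp
    have ihr := ih (fun x hx => hsp x (by simp [hx]))
    by_cases hw : w = []
    · subst hw
      rw [show csq ([] :: rest) = csq rest from by simp [csq]]
      have hfil : (([] : List Char) :: rest).filter (fun x => x ≠ []) =
          rest.filter (fun x => x ≠ []) := by simp
      rw [hfil]
      by_cases hrest : rest = []
      · subst hrest; simp [csq, List.intercalate]
      · have hgl : (([] : List Char) :: rest).getLast? = rest.getLast? := by
          cases rest with
          | nil => exact absurd rfl hrest
          | cons a b => exact List.getLast?_cons_cons
        rw [hgl]; exact ihr
    · have hfil : (w :: rest).filter (fun x => x ≠ []) = w :: rest.filter (fun x => x ≠ []) := by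
        simp [hw]
      rw [show csq (w :: rest) = w ++ (if rest = [] then [] else ' ' :: csq rest) from by
        simp [csq, hw], hfil]
      set tr := rest.filter (fun x => x ≠ []) with htr
      by_cases hrest : rest = []
      · subst hrest
        have htr0 : tr = [] := by simp [htr]
        rw [htr0]
        simp [inter_cons, List.intercalate, hw]
      · have hgl : (w :: rest).getLast? = rest.getLast? := by
          cases rest with
          | nil => exact absurd rfl hrest
          | cons a b => exact List.getLast?_cons_cons
        rw [if_neg hrest, ihr, hgl]
        by_cases htrn : tr = []
        · have hglr : rest.getLast? = some [] := by
            apply getLast?_all_nonempty rest hrest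
            intro x hx
            by_contra hxne
            have : x ∈ tr := List.mem_filter.2 ⟨hx, by simpa using hxne⟩
            rw [htrn] at this; simp at this
          rw [htrn, hglr]
          rw [show List.intercalate [' '] ([] : List (List Char)) = [] from by
            simp [List.intercalate]]
          rw [inter_cons, if_pos rfl]
          simp
        · rw [inter_cons w tr, if_neg htrn]
          by_cases hgle : rest.getLast? = some []
          · simp [htrn, hgle]
          · simp [htrn, hgle]

theorem cRun_inter_true : ∀ (ws : List (List Char)), (∀ w ∈ ws, ' ' ∉ w) →
    cRun (List.intercalate [' '] ws) true = csq ws := by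
  intro ws
  induction ws with
  | nil => intro _; simp [List.intercalate, cRun, csq]
  | cons w rest ih =>
    intro hsp
    have ihr := ih (fun x hx => hsp x (by simp [hx]))
    rw [inter_cons]
    by_cases hw : w = []
    · subst hw
      by_cases hrest : rest = []
      · subst hrest; simp [cRun, csq]
      · rw [if_neg hrest]
        rw [List.nil_append]
        rw [show cRun (' ' :: List.intercalate [' '] rest) true
              = cRun (List.intercalate [' '] rest) true from by simp [cRun]]
        rw [ihr]
        simp [csq]
    · by_cases hrest : rest = []
      · subst hrest
        rw [if_pos rfl]
        rw [show List.intercalate [' '] ([] : List (List Char)) = [] from by simp [List.intercalate]] at *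
        rw [show w = w ++ ([] : List Char) from by simp] at *
        rw [cRun_append w (hsp w (by simp)) (by simpa using hw) [] true]
        simp [csq, cRun, hw]
      · rw [if_neg hrest]
        rw [cRun_append w (hsp w (by simp)) hw _ true]
        rw [show cRun (' ' :: List.intercalate [' '] rest) false
              = ' ' :: cRun (List.intercalate [' '] rest) true from by simp [cRun]]
        rw [ihr]
        simp [csq, hw, hrest]

theorem inter_tokens_getLast (ts : List (List Char)) (hne : ∀ t ∈ ts, t ≠ [])
    (hsp : ∀ t ∈ ts, ' ' ∉ t) : (List.intercalate [' '] ts).getLast? ≠ some ' ' := by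
  induction ts with
  | nil => simp [List.intercalate]
  | cons t rest ih =>
    rw [inter_cons]
    by_cases hrest : rest = []
    · rw [if_pos hrest]
      intro h
      have := List.mem_of_getLast? h
      exact hsp t (by simp) this
    · rw [if_neg hrest]
      have hinterne : List.intercalate [' '] rest ≠ [] := by
        cases hrr : rest with
        | nil => exact absurd hrr hrest
        | cons a b =>
          exact interNE (a :: b) a (by simp) (hne a (by simp [hrr]))
      rw [List.getLast?_append_of_ne_nil _ (by simp)]
      rw [glast_cons_of_ne ' ' _ hinterne]
      exact ih (fun x hx => hne x (by simp [hx])) (fun x hx => hsp x (by simp [hx]))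

theorem strip1_concat_space (A : List Char) : strip1 (A ++ [' ']) = A := by
  rw [strip1, if_pos (by rw [List.getLast?_append_of_ne_nil _ (by simp)]; rfl)]
  exact List.dropLast_concat

theorem strip1_of_ne (A : List Char) (h : A.getLast? ≠ some ' ') : strip1 A = A := by
  rw [strip1, if_neg h]

theorem lfmt_cons_ne (w : List Char) (rest : List (List Char)) (hw : w ≠ []) :
    lfmt (w :: rest) = List.intercalate [' '] (w :: rest.filter (fun x => x ≠ [])) := by
  rw [lfmt]
  have hfil : (w :: rest).filter (fun x => x ≠ []) = w :: rest.filter (fun x => x ≠ []) := by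
    simp [hw]
  rw [hfil, if_neg (by rintro ⟨h, _⟩; simp at h; exact hw h)]

theorem lfmt_cons_nil (rest : List (List Char)) :
    lfmt ([] :: rest) =
      (if rest.filter (fun x => x ≠ []) = [] then []
       else ' ' :: List.intercalate [' '] (rest.filter (fun x => x ≠ []))) := by
  rw [lfmt]
  have hfil : (([] : List Char) :: rest).filter (fun x => x ≠ []) =
      rest.filter (fun x => x ≠ []) := by simp
  rw [hfil]
  by_cases h : rest.filter (fun x => x ≠ []) = []
  · rw [if_pos h, if_neg (by rintro ⟨_, hh⟩; exact hh h), h]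
    simp [List.intercalate]
  · rw [if_neg h, if_pos ⟨rfl, h⟩]

-- B's collapse-and-strip of an intercalated word list is the normalised middle
theorem cs_lfmt : ∀ (ws : List (List Char)), (∀ w ∈ ws, ' ' ∉ w) →
    strip1 (cRun (List.intercalate [' '] ws) false) = lfmt ws := by
  intro ws hsp
  cases ws with
  | nil => simp [List.intercalate, cRun, strip1, lfmt]
  | cons w rest =>
    have hspw := hsp w (by simp)
    have hsprest : ∀ x ∈ rest, ' ' ∉ x := fun x hx => hsp x (by simp [hx])
    set tr := rest.filter (fun x => x ≠ []) with htr
    have htrne : ∀ t ∈ tr, t ≠ [] := by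
      intro t ht; rw [htr] at ht; simpa using (List.mem_filter.1 ht).2
    have htrsp : ∀ t ∈ tr, ' ' ∉ t := by
      intro t ht; rw [htr] at ht; exact hsprest t (List.mem_filter.1 ht).1
    have hcsq := csq_spec rest hsprest
    rw [← htr] at hcsq
    rw [inter_cons]
    by_cases hw : w = []
    · subst hw
      rw [lfmt_cons_nil, ← htr]
      by_cases hrest : rest = []
      · subst hrest
        have htr0 : tr = [] := by rw [htr]; rfl
        rw [if_pos rfl, if_pos htr0]
        simp [cRun, strip1]
      · rw [if_neg hrest, List.nil_append]
        rw [show cRun (' ' :: List.intercalate [' '] rest) false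
              = ' ' :: cRun (List.intercalate [' '] rest) true from by simp [cRun]]
        rw [cRun_inter_true rest hsprest, hcsq]
        by_cases htrn : tr = []
        · rw [if_pos htrn, htrn,
              show List.intercalate [' '] ([] : List (List Char)) = [] from by
                simp [List.intercalate],
              if_neg (by simp)]
          simp [strip1]
        · rw [if_neg htrn]
          have hinterne := tokens_ne_inter_ne tr rest htr htrn
          have hlast := inter_tokens_getLast tr htrne htrsp
          by_cases hgle : rest.getLast? = some []
          · rw [if_pos ⟨htrn, hgle⟩]
            rw [show ' ' :: (List.intercalate [' '] tr ++ [' ']) =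
                  (' ' :: List.intercalate [' '] tr) ++ [' '] from by simp]
            exact strip1_concat_space _
          · rw [if_neg (by rintro ⟨_, h⟩; exact hgle h), List.append_nil]
            exact strip1_of_ne _ (by rw [glast_cons_of_ne ' ' _ hinterne]; exact hlast)
    · rw [lfmt_cons_ne w rest hw, ← htr]
      by_cases hrest : rest = []
      · subst hrest
        have htr0 : tr = [] := by rw [htr]; rfl
        rw [if_pos rfl, htr0, inter_cons, if_pos rfl]
        have hcw : cRun w false = w := by
          conv_lhs => rw [show w = w ++ ([] : List Char) from (List.append_nil w).symm]
          rw [cRun_append w hspw hw [] false]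
          simp [cRun]
        rw [hcw]
        exact strip1_of_ne _ (fun h => hspw (List.mem_of_getLast? h))
      · rw [if_neg hrest]
        rw [cRun_append w hspw hw _ false]
        rw [show cRun (' ' :: List.intercalate [' '] rest) false
              = ' ' :: cRun (List.intercalate [' '] rest) true from by simp [cRun]]
        rw [cRun_inter_true rest hsprest, hcsq]
        by_cases htrn : tr = []
        · rw [htrn,
              show List.intercalate [' '] ([] : List (List Char)) = [] from by
                simp [List.intercalate],
              if_neg (by simp)]
          rw [show w ++ ' ' :: (([] : List Char) ++ []) = w ++ [' '] from by simp]
          rw [strip1_concat_space]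
          rw [inter_cons, if_pos rfl]
        · have hinterne := tokens_ne_inter_ne tr rest htr htrn
          have hlast := inter_tokens_getLast tr htrne htrsp
          rw [inter_cons w tr, if_neg htrn]
          by_cases hgle : rest.getLast? = some []
          · rw [if_pos ⟨htrn, hgle⟩]
            rw [show w ++ ' ' :: (List.intercalate [' '] tr ++ [' ']) =
                  (w ++ ' ' :: List.intercalate [' '] tr) ++ [' '] from by simp]
            exact strip1_concat_space _
          · rw [if_neg (by rintro ⟨_, h⟩; exact hgle h), List.append_nil]
            apply strip1_of_ne
            rw [List.getLast?_append_of_ne_nil _ (by simp)]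
            rw [glast_cons_of_ne ' ' _ hinterne]
            exact hlast

-- properties of splitTrail's first component
theorem splitTrail_fst_mem (ws : List (List Char)) :
    ∀ w ∈ (splitTrail ws).1, w ∈ ws := by
  induction ws with
  | nil => simp [splitTrail]
  | cons w rest ih =>
    by_cases h : w.head? = some ':'
    · rw [splitTrail_cons_colon w rest h]; simp
    · rw [splitTrail_cons_not w rest h]
      intro x hx
      rcases List.mem_cons.1 hx with rfl | hx2
      · simp
      · exact List.mem_cons_of_mem _ (ih x hx2)

theorem splitTrail_fst_not_colon (ws : List (List Char)) :
    ∀ w ∈ (splitTrail ws).1, w.head? ≠ some ':' := by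
  induction ws with
  | nil => simp [splitTrail]
  | cons w rest ih =>
    by_cases h : w.head? = some ':'
    · rw [splitTrail_cons_colon w rest h]; simp
    · rw [splitTrail_cons_not w rest h]
      intro x hx
      rcases List.mem_cons.1 hx with rfl | hx2
      · exact h
      · exact ih x hx2

-- structure of the intercalation when a trailing part exists
theorem splitTrail_struct : ∀ (ws : List (List Char)) (x : List Char),
    (splitTrail ws).2 = some x → (splitTrail ws).1 ≠ [] →
    List.intercalate [' '] ws =
      List.intercalate [' '] (splitTrail ws).1 ++ ' ' :: ':' :: x := by
  intro ws
  induction ws with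
  | nil => intro x h _; simp [splitTrail] at h
  | cons w rest ih =>
    intro x hx hne
    by_cases hcol : w.head? = some ':'
    · rw [splitTrail_cons_colon w rest hcol] at hne
      exact absurd rfl hne
    · have hst1 : (splitTrail (w :: rest)).1 = w :: (splitTrail rest).1 := by
        rw [splitTrail_cons_not w rest hcol]
      have hst2 : (splitTrail (w :: rest)).2 = (splitTrail rest).2 := by
        rw [splitTrail_cons_not w rest hcol]
      rw [hst2] at hx
      rw [hst1]
      by_cases hp1 : (splitTrail rest).1 = []
      · cases hrest : rest with
        | nil => rw [hrest] at hx; simp [splitTrail] at hx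
        | cons w' r' =>
          rw [hrest] at hx hp1
          by_cases hcol' : w'.head? = some ':'
          · obtain ⟨v, rfl⟩ : ∃ v, w' = ':' :: v := by
              cases w' with
              | nil => simp at hcol'
              | cons c t => simp at hcol'; exact ⟨t, by rw [hcol']⟩
            rw [show (splitTrail ((':' :: v) :: r')).2
                  = some ((PySem.Chars.join [' '] ((':' :: v) :: r')).drop 1) from by
              rw [splitTrail_cons_colon _ r' (by simp)]] at hx
            simp only [Option.some.injEq] at hx
            have hjoin : PySem.Chars.join [' '] ((':' :: v) :: r') =
                List.intercalate [' '] ((':' :: v) :: r') := rfl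
            rw [hjoin] at hx
            rw [hp1]
            rw [inter_cons w ((':' :: v) :: r'), if_neg (by simp)]
            rw [show List.intercalate [' '] [w] = w from by simp [List.intercalate]]
            rw [← hx, inter_cons (':' :: v) r']
            by_cases hr' : r' = [] <;> simp [hr']
          · exfalso
            rw [show (splitTrail (w' :: r')).1 = w' :: (splitTrail r').1 from by
              rw [splitTrail_cons_not _ r' hcol']] at hp1
            simp at hp1
      · have hrestne : rest ≠ [] := by rintro rfl; simp [splitTrail] at hx
        rw [inter_cons w rest, if_neg hrestne, ih x hx hp1]
        rw [inter_cons w ((splitTrail rest).1), if_neg hp1]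
        simp

-- location of the first ' :' occurrence
theorem find_at (M x : List Char)
    (h : ∀ i < M.length, ¬ [' ', ':'] <+: (M ++ ' ' :: ':' :: x).drop i) :
    PySem.Chars.find (M ++ ' ' :: ':' :: x) [' ', ':'] = (M.length : Int) := by
  set l := M ++ ' ' :: ':' :: x with hldef
  have hocc : [' ', ':'] <+: l.drop M.length := by
    rw [hldef, List.drop_left]
    exact ⟨x, rfl⟩
  have hinf : [' ', ':'] <:+: l := by
    refine ⟨M, x, ?_⟩
    simp [hldef]
  have hnn : 0 ≤ PySem.Chars.find l [' ', ':'] := (PySem.Chars.find_nonneg_iff _ _).2 hinf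
  obtain ⟨hpf, hmin⟩ := PySem.Chars.find_spec hnn
  set f := PySem.Chars.find l [' ', ':'] with hf
  have h1 : M.length ≤ f.toNat := by
    by_contra hlt
    exact h f.toNat (by omega) hpf
  have h2 : f.toNat ≤ M.length := by
    by_contra hlt
    exact hmin M.length (by omega) hocc
  omega

theorem no_occ_before (mids : List (List Char)) (x : List Char)
    (hsp : ∀ w ∈ mids, ' ' ∉ w) (hcol : ∀ w ∈ mids, w.head? ≠ some ':') :
    ∀ i < (List.intercalate [' '] mids).length,
      ¬ [' ', ':'] <+: (List.intercalate [' '] mids ++ ' ' :: ':' :: x).drop i := by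
  set M := List.intercalate [' '] mids with hM
  intro i hi hpf
  rw [List.drop_append_of_le_length (by omega)] at hpf
  obtain ⟨t, ht⟩ := hpf
  cases hd : M.drop i with
  | nil =>
    have hlen := congrArg List.length hd
    simp at hlen
    omega
  | cons c d =>
    rw [hd] at ht
    cases d with
    | nil =>
      simp only [List.cons_append, List.nil_append] at ht
      injection ht with h1 ht2
      injection ht2 with h2 _
      exact absurd h2 (by decide)
    | cons c2 d2 =>
      simp only [List.cons_append, List.nil_append] at ht
      injection ht with h1 ht2
      injection ht2 with h2 _
      subst h1
      subst h2
      have hinfM : [' ', ':'] <:+: M := by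
        refine ⟨M.take i, d2, ?_⟩
        rw [show M.take i ++ [' ', ':'] ++ d2 = M.take i ++ (' ' :: ':' :: d2) from by simp]
        rw [← hd]
        exact List.take_append_drop i M
      obtain ⟨w, hw, hwc⟩ := (tic_iff mids hsp).2 (Or.inr hinfM)
      exact hcol w hw hwc

-- ===== B's side assembled, per branch =====

theorem startswith_false_iff (l : List Char) :
    PySem.Chars.startswith l [':'] = false ↔ l.head? ≠ some ':' := by
  constructor
  · intro hb h
    exact absurd (((sw_colon l).2 h).symm.trans hb) (by decide)
  · intro h
    cases hb : PySem.Chars.startswith l [':'] with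
    | false => rfl
    | true => exact absurd ((sw_colon l).1 hb) h

theorem parse_alt_open (params : String) (hl : params.toList ≠ []) :
    parse_alt params =
      ((if strip1 (collapse1 (splitTrail2 params.toList).1) ≠ [] then
          some (String.ofList (strip1 (collapse1 (splitTrail2 params.toList).1))) else none),
       (splitTrail2 params.toList).2.map String.ofList) := by
  rw [parse_alt]
  rw [if_neg hl]

theorem main_core (params : String) (hD : ¬ D_parse params) : parse params = parse_alt params := by
  by_cases hl : params.toList = []
  · rw [parse, parse_alt, if_pos hl, if_pos hl]
  · rw [parse_eq params hl, parse_alt_open params hl]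
    set l := params.toList with hldef
    set ws := List.splitOn ' ' l with hwsdef
    have hsp : ∀ w ∈ ws, ' ' ∉ w := splitOn_no_space l
    have hne : ws ≠ [] := splitOn_ne_nil l
    have hne1 : ws ≠ [[]] := fun h => hl (splitOn_eq_nil_nil l h)
    have hj : List.intercalate [' '] ws = l := List.intercalate_splitOn l ' '
    obtain ⟨ra, rb, rc, rd⟩ := refW_splitTrail ws.length ws le_rfl hsp hne hne1
    by_cases hstart : l.head? = some ':'
    · -- leading ':' : trailing = rest of the string, middle = none
      obtain ⟨v, rest, hws⟩ : ∃ v rest, ws = (':' :: v) :: rest := by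
        cases hws : ws with
        | nil => exact absurd hws hne
        | cons w r =>
          cases hw : w with
          | nil =>
            exfalso
            have := hj
            rw [hws, hw, inter_cons] at this
            by_cases hr : r = []
            · rw [if_pos hr] at this; exact hl this.symm
            · rw [if_neg hr] at this
              rw [← this] at hstart
              simp at hstart
          | cons c t =>
            refine ⟨t, r, ?_⟩
            have := hj
            rw [hws, hw, inter_cons] at this
            have hc : c = ':' := by
              by_cases hr : r = []
              · rw [if_pos hr] at this; rw [← this] at hstart; simpa using hstart
              · rw [if_neg hr] at this; rw [← this] at hstart; simpa using hstart
            rw [hc]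
      have hst2 : splitTrail2 l = ([], some (l.drop 1)) := by
        rw [splitTrail2, if_pos ((sw_colon l).2 hstart)]
        rw [PySem.List.slice_from_one, List.drop_one]
      have hsteq : splitTrail ws = ([], some (l.drop 1)) := by
        rw [hws, splitTrail_cons_colon _ rest (by simp)]
        have : PySem.Chars.join [' '] ((':' :: v) :: rest) = List.intercalate [' '] ws := by
          rw [hws]; rfl
        rw [this, hj]
      obtain ⟨hch, hrest⟩ := rb (l.drop 1) (by rw [hsteq])
      have hmid : fixup (refW ws).1 (refW ws).2.1 = [] := by
        rw [ra, bmid, hsteq]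
        simp [List.intercalate]
      rw [hst2, hmid, hch, hrest]
      simp [collapse1, strip1]
    · have hstartb : PySem.Chars.startswith l [':'] = false :=
        (startswith_false_iff l).2 hstart
      by_cases hfind : PySem.Chars.find l [' ', ':'] = -1
      · -- no trailing at all
        have hninf : ¬ [' ', ':'] <:+: l := (PySem.Chars.find_eq_neg_one_iff l _).1 hfind
        have hnocolon : ∀ w ∈ ws, w.head? ≠ some ':' := by
          intro w hw hwc
          have := (tic_iff ws hsp).1 ⟨w, hw, hwc⟩
          rw [hj] at this
          rcases this with hh | hi
          · exact hstart hh
          · exact hninf hi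
        have hsteq : splitTrail ws = (ws, none) := splitTrail_all_not ws hnocolon
        have hst2 : splitTrail2 l = (l, none) := by
          rw [splitTrail2, if_neg (by simp [hstartb])]
          simp [hfind]
        obtain ⟨_, hc⟩ := rc (by rw [hsteq])
        have hcne : (refW ws).2.2.1 ≠ ':' := by
          intro hcc
          apply hD
          refine ⟨hl, ?_, hstart, ?_⟩
          · rw [PySem.List.pyGet?_neg_one]
            exact gl2 l ' ' ':' hl (by rw [← hj, ← hc]; exact hcc)
          · rw [PySem.Chars.isIn_eq_false_iff]
            exact hninf
        rw [hst2, if_neg hcne]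
        have hmid : fixup (refW ws).1 (refW ws).2.1 = strip1 (collapse1 l) := by
          rw [ra, collapse1_eq, ← hj, cs_lfmt ws hsp]
          rw [bmid, hsteq, lfmt]
        rw [hmid]
        rfl
      · -- a trailing part exists at the first ' :'
        have hinf : [' ', ':'] <:+: l := by
          by_contra hn
          exact hfind ((PySem.Chars.find_eq_neg_one_iff l _).2 hn)
        have hexcol : ∃ w ∈ ws, w.head? = some ':' := by
          apply (tic_iff ws hsp).2
          rw [hj]
          exact Or.inr hinf
        obtain ⟨x, hx⟩ : ∃ x, (splitTrail ws).2 = some x := by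
          cases hsx : (splitTrail ws).2 with
          | none =>
            obtain ⟨w, hw, hwc⟩ := hexcol
            exact absurd hwc (((splitTrail_none_iff' ws).1 hsx) w hw)
          | some y => exact ⟨y, rfl⟩
        obtain ⟨w0, rest0, hws0⟩ : ∃ w0 rest0, ws = w0 :: rest0 := by
          cases hws : ws with
          | nil => exact absurd hws hne
          | cons a b => exact ⟨a, b, rfl⟩
        have hw0 : w0.head? ≠ some ':' := by
          intro hcc
          apply hstart
          rw [← hj, hws0, inter_cons]
          cases hw : w0 with
          | nil => rw [hw] at hcc; simp at hcc
          | cons c t =>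
            rw [hw] at hcc
            simp at hcc
            by_cases hr : rest0 = [] <;> simp [hr, hcc]
        have hmidsne : (splitTrail ws).1 ≠ [] := by
          rw [hws0, splitTrail_cons_not w0 rest0 hw0]
          simp
        set mids := (splitTrail ws).1 with hmids
        have hmsp : ∀ w ∈ mids, ' ' ∉ w := fun w hw => hsp w (splitTrail_fst_mem ws w hw)
        have hmcol : ∀ w ∈ mids, w.head? ≠ some ':' := splitTrail_fst_not_colon ws
        set M := List.intercalate [' '] mids with hM
        have hlM : l = M ++ ' ' :: ':' :: x := by
          rw [← hj]
          exact splitTrail_struct ws x hx hmidsne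
        have hfval : PySem.Chars.find l [' ', ':'] = (M.length : Int) := by
          rw [hlM]
          exact find_at M x (no_occ_before mids x hmsp hmcol)
        have hst2 : splitTrail2 l = (M, some x) := by
          rw [splitTrail2, if_neg (by simp [hstartb])]
          simp only [hfval]
          rw [if_neg (by omega)]
          congr 1
          · rw [PySem.List.slice_to_natCast, hlM, List.take_left]
          · congr 1
            rw [show ((M.length : Int) + 2) = ((M.length + 2 : Nat) : Int) from by push_cast; ring]
            rw [PySem.List.slice_from_natCast]
            rw [hlM]
            rw [show M ++ ' ' :: ':' :: x = (M ++ [' ', ':']) ++ x from by simp]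
            rw [show M.length + 2 = (M ++ [' ', ':']).length from by simp]
            exact List.drop_left
        obtain ⟨hch, hrest⟩ := rb x hx
        rw [hst2, hch, if_pos rfl, hrest]
        have hmid : fixup (refW ws).1 (refW ws).2.1 = strip1 (collapse1 M) := by
          rw [ra, collapse1_eq, hM, cs_lfmt mids hmsp]
          rw [bmid, lfmt, ← hmids]
          have hheads : ws.head? = mids.head? := by
            rw [hws0, hmids, hws0, splitTrail_cons_not w0 rest0 hw0]
            rfl
          rw [hheads]
        rw [hmid]
        rfl

theorem tight_core (params : String) (hD : D_parse params) : parse params ≠ parse_alt params := by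
  obtain ⟨hl, hlast, hhead, hinf⟩ := hD
  rw [parse_eq params hl, parse_alt_open params hl]
  set l := params.toList with hldef
  set ws := List.splitOn ' ' l with hwsdef
  have hsp : ∀ w ∈ ws, ' ' ∉ w := splitOn_no_space l
  have hne : ws ≠ [] := splitOn_ne_nil l
  have hne1 : ws ≠ [[]] := fun h => hl (splitOn_eq_nil_nil l h)
  have hj : List.intercalate [' '] ws = l := List.intercalate_splitOn l ' '
  obtain ⟨ra, rb, rc, rd⟩ := refW_splitTrail ws.length ws le_rfl hsp hne hne1
  have hninf : ¬ [' ', ':'] <:+: l := (PySem.Chars.isIn_eq_false_iff _ _).1 hinf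
  have h2 : (splitTrail ws).2 = none := by
    rw [splitTrail_none_iff' ws]
    intro w hw hwc
    have := (tic_iff ws hsp).1 ⟨w, hw, hwc⟩
    rw [hj] at this
    rcases this with hh | hi
    · exact hhead hh
    · exact hninf hi
  obtain ⟨hr, hc⟩ := rc h2
  have hcolon : (refW ws).2.2.1 = ':' := by
    rw [hc, hj]
    rw [PySem.List.pyGet?_neg_one] at hlast
    simp [List.getLastD_eq_getLast?, hlast]
  have hst2 : splitTrail2 l = (l, none) := by
    rw [splitTrail2, if_neg (by simp [(startswith_false_iff l).2 hhead])]
    simp [(PySem.Chars.find_eq_neg_one_iff l _).2 hninf]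
  rw [hst2, hcolon, if_pos rfl]
  intro heq
  have := congrArg Prod.snd heq
  simp at this

-- ===== VERDICT (by name: the statement is the Claim_ definition above) =====
theorem parse_spec : Claim_unchanged_parse := by
  intro params _ hD
  exact main_core params hD

theorem parse_changed : Claim_changed_parse := by
  unfold Claim_changed_parse; decide

theorem parse_tight : Claim_exact_parse := by
  intro params _ hD
  exact tight_core params hD
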